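-- pv_equiv track=rewrite | github.com/ruescasd/nxt | src/nxt/model/views.py | _format_property_table
-- ===== SOURCE A (Python) =====
-- def _format_property_table(rows: list[tuple[str, str, list[str], list[str]]]) -> str:
--     """Format property rows as a table matching legacy output."""
--     # Column widths matching legacy output
--     name_width = 18
--     desc_width = 52
--     attack_width = 79
--     mit_width = 33
--
--     lines = []
--
--     # Header
--     sep = f"+{'-' * (name_width + 2)}+{'-' * (desc_width + 2)}+{'-' * (attack_width + 2)}+{'-' * (mit_width + 2)}+"
--     header_sep = f"+{'=' * (name_width + 2)}+{'=' * (desc_width + 2)}+{'=' * (attack_width + 2)}+{'=' * (mit_width + 2)}+"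
--
--     lines.append(sep)
--     lines.append(f"| {'Name'.ljust(name_width)} | {'Description'.ljust(desc_width)} | {'Attacks'.ljust(attack_width)} | {'Mitigations'.ljust(mit_width)} |")
--     lines.append(header_sep)
--
--     for name, desc, attacks, mitigations in rows:
--         # Calculate max rows needed for this property
--         max_rows = max(1, len(attacks), len(mitigations))
--
--         for i in range(max_rows):
--             # First row gets name and description
--             if i == 0:
--                 name_cell = name[:name_width].ljust(name_width)
--                 desc_cell = desc[:desc_width].ljust(desc_width)
--             else:
--                 name_cell = " " * name_width
--                 desc_cell = " " * desc_width
--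
--             # Attack for this row
--             if i < len(attacks):
--                 attack_cell = attacks[i][:attack_width].ljust(attack_width)
--             else:
--                 attack_cell = " " * attack_width
--
--             # Mitigation for this row
--             if i < len(mitigations):
--                 mit_cell = mitigations[i][:mit_width].ljust(mit_width)
--             else:
--                 mit_cell = " " * mit_width
--
--             lines.append(f"| {name_cell} | {desc_cell} | {attack_cell} | {mit_cell} |")
--
--         lines.append(sep)
--
--     return "\n".join(lines)
-- ===== SOURCE B (Python) =====
-- def _format_property_table(rows: list[tuple[str, str, list[str], list[str]]]) -> str:
--     """Format property rows as a table (column-major construction)."""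
--     name_width = 18
--     desc_width = 52
--     attack_width = 79
--     mit_width = 33
--
--     sep = f"+{'-' * (name_width + 2)}+{'-' * (desc_width + 2)}+{'-' * (attack_width + 2)}+{'-' * (mit_width + 2)}+"
--     header_sep = f"+{'=' * (name_width + 2)}+{'=' * (desc_width + 2)}+{'=' * (attack_width + 2)}+{'=' * (mit_width + 2)}+"
--
--     lines = [
--         sep,
--         f"| {'Name'.ljust(name_width)} | {'Description'.ljust(desc_width)} | {'Attacks'.ljust(attack_width)} | {'Mitigations'.ljust(mit_width)} |",
--         header_sep,
--     ]
--
--     for name, desc, attacks, mitigations in rows: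
--         max_rows = max(1, len(attacks), len(mitigations))
--         # Build the four columns, each of length max_rows.
--         name_col = [name[:name_width].ljust(name_width)] + [" " * name_width] * (max_rows - 1)
--         desc_col = [desc[:desc_width].ljust(desc_width)] + [" " * desc_width] * (max_rows - 1)
--         attack_col = [a[:attack_width].ljust(attack_width) for a in attacks] \
--             + [" " * attack_width] * (max_rows - len(attacks))
--         mit_col = [m[:mit_width].ljust(mit_width) for m in mitigations] \
--             + [" " * mit_width] * (max_rows - len(mitigations))
--         for n, d, a, m in zip(name_col, desc_col, attack_col, mit_col):
--             lines.append(f"| {n} | {d} | {a} | {m} |")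
--         lines.append(sep)
--
--     return "\n".join(lines)
-- ===== Notes on version B (the rewrite author's own statement) =====
-- stated objective: alternative
-- what changed: Each property block is built column-major — four padded column lists (name, description, attacks, mitigations) of equal length are constructed and zipped into lines — instead of A's row-major index loop that re-selects every cell by comparing the row index against 0 and the list lengths.
import Mathlib
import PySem

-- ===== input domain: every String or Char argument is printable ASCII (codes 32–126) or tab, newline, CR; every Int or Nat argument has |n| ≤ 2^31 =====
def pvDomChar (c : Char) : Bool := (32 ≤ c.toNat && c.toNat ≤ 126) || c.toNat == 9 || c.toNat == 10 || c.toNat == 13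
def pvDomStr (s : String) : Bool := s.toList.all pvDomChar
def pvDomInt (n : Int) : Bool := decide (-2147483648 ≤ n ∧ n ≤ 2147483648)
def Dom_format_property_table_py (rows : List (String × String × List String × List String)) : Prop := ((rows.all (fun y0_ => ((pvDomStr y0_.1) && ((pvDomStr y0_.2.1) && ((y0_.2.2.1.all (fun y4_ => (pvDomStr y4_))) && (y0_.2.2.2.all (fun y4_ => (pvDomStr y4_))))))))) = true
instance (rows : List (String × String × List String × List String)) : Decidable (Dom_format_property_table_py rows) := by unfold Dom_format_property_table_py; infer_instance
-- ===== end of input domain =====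

-- B builds each property block column-major (four padded column lists zipped into lines)
-- instead of A's row-major index loop; objective: alternative decomposition, same cost.

-- shared cell helpers (both Pythons contain the identical expressions s[:w].ljust(w), ' '*w, the literal
-- separator/header constructions and '\n'.join; everything is computed on List Char, exact for all code points)
-- s.ljust(w)
def pvPad (w : Nat) (s : List Char) : List Char := s ++ List.replicate (w - s.length) ' '
-- s[:w].ljust(w)
def pvCell (w : Nat) (s : List Char) : List Char := pvPad w (s.take w)
-- ' ' * w
def pvBlank (w : Nat) : List Char := List.replicate w ' '
-- f"| {n} | {d} | {a} | {m} |"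
def pvRowLine (n d a m : List Char) : List Char :=
  ['|', ' '] ++ n ++ [' ', '|', ' '] ++ d ++ [' ', '|', ' '] ++ a ++ [' ', '|', ' '] ++ m ++ [' ', '|']
-- f"+{c*(18+2)}+{c*(52+2)}+{c*(79+2)}+{c*(33+2)}+"
def pvSepWith (c : Char) : List Char :=
  ['+'] ++ List.replicate 20 c ++ ['+'] ++ List.replicate 54 c ++ ['+'] ++ List.replicate 81 c ++ ['+'] ++ List.replicate 35 c ++ ['+']
def pvSep : List Char := pvSepWith '-'
def pvHeaderSep : List Char := pvSepWith '='
def pvHeaderLine : List Char :=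
  pvRowLine (pvPad 18 "Name".toList) (pvPad 52 "Description".toList) (pvPad 79 "Attacks".toList) (pvPad 33 "Mitigations".toList)

-- ===== PORT A =====
-- A: row-major — for each property, loop i over range(max_rows) and pick each cell by comparing i
-- with 0 / len(attacks) / len(mitigations).
def format_property_table_py (rows : List (String × String × List String × List String)) : String :=
  let lines0 : List (List Char) := [pvSep, pvHeaderLine, pvHeaderSep]
  let lines := rows.foldl (fun acc r =>
    let name := r.1.toList
    let desc := r.2.1.toList
    let attacks := r.2.2.1.map String.toList
    let mitigations := r.2.2.2.map String.toList
    let maxRows : Int := max 1 (max (attacks.length : Int) (mitigations.length : Int))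
    let acc := (PySem.List.pyRange 0 maxRows 1).foldl (fun acc2 i =>
      let nameCell := if i = 0 then pvCell 18 name else pvBlank 18
      let descCell := if i = 0 then pvCell 52 desc else pvBlank 52
      let attackCell := if i < (attacks.length : Int) then pvCell 79 (PySem.List.pyGetD attacks i []) else pvBlank 79
      let mitCell := if i < (mitigations.length : Int) then pvCell 33 (PySem.List.pyGetD mitigations i []) else pvBlank 33
      acc2 ++ [pvRowLine nameCell descCell attackCell mitCell]) acc
    acc ++ [pvSep]) lines0
  String.ofList (PySem.Chars.join ['\n'] lines)

-- ===== PORT B =====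
-- B: column-major — build four padded columns of equal length, zip them into the lines.
def format_property_table_py_alt (rows : List (String × String × List String × List String)) : String :=
  let lines0 : List (List Char) := [pvSep, pvHeaderLine, pvHeaderSep]
  let lines := rows.foldl (fun acc r =>
    let name := r.1.toList
    let desc := r.2.1.toList
    let attacks := r.2.2.1.map String.toList
    let mitigations := r.2.2.2.map String.toList
    let maxRows : Nat := max 1 (max attacks.length mitigations.length)
    let nameCol := pvCell 18 name :: List.replicate (maxRows - 1) (pvBlank 18)
    let descCol := pvCell 52 desc :: List.replicate (maxRows - 1) (pvBlank 52)
    let attackCol := attacks.map (pvCell 79) ++ List.replicate (maxRows - attacks.length) (pvBlank 79)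
    let mitCol := mitigations.map (pvCell 33) ++ List.replicate (maxRows - mitigations.length) (pvBlank 33)
    let zipped := (nameCol.zip (descCol.zip (attackCol.zip mitCol))).map
      (fun p => pvRowLine p.1 p.2.1 p.2.2.1 p.2.2.2)
    acc ++ zipped ++ [pvSep]) lines0
  String.ofList (PySem.Chars.join ['\n'] lines)

-- ===== PRECONDITION & SPEC =====
def Spec_format_property_table_py (rows : List (String × String × List String × List String)) (out : String) : Prop := out = format_property_table_py_alt rows
instance (rows : List (String × String × List String × List String)) (out : String) : Decidable (Spec_format_property_table_py rows out) := by unfold Spec_format_property_table_py; infer_instance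

-- ===== CLAIM (what is proved, stated in full; the proofs are below) =====
def Claim_equal_format_property_table_py : Prop := ∀ (rows : List (String × String × List String × List String)), Dom_format_property_table_py rows → Spec_format_property_table_py rows (format_property_table_py rows)

-- ===== LEMMAS AND PROOFS =====

-- indexing facts for the padded columns (specific to this file's column shapes)
theorem pv_col_head (m i : Nat) (x b : List Char) (h : i < (x :: List.replicate (m-1) b).length) :
    (x :: List.replicate (m-1) b)[i] = if (i:Int) = 0 then x else b := by
  cases i with
  | zero => simp
  | succ j => simp [List.getElem_replicate]; omega

theorem pv_col_pad (w m i : Nat) (xs : List (List Char)) (_hle : xs.length ≤ m)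
    (h : i < (xs.map (pvCell w) ++ List.replicate (m - xs.length) (pvBlank w)).length) :
    (xs.map (pvCell w) ++ List.replicate (m - xs.length) (pvBlank w))[i]
    = if (i:Int) < (xs.length:Int) then pvCell w (PySem.List.pyGetD xs (i:Int) []) else pvBlank w := by
  by_cases hi : i < xs.length
  · rw [List.getElem_append_left (by simp; omega)]
    simp [hi, PySem.List.pyGetD_natCast, List.getD_eq_getElem?_getD]
  · rw [List.getElem_append_right (by simp; omega)]
    simp [List.getElem_replicate]
    omega

theorem pv_block_eq_proof (name desc : List Char) (attacks mitigations : List (List Char)) (acc : List (List Char)) :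
    (PySem.List.pyRange 0 (max 1 (max (attacks.length : Int) (mitigations.length : Int))) 1).foldl (fun acc2 i =>
      let nameCell := if i = 0 then pvCell 18 name else pvBlank 18
      let descCell := if i = 0 then pvCell 52 desc else pvBlank 52
      let attackCell := if i < (attacks.length : Int) then pvCell 79 (PySem.List.pyGetD attacks i []) else pvBlank 79
      let mitCell := if i < (mitigations.length : Int) then pvCell 33 (PySem.List.pyGetD mitigations i []) else pvBlank 33
      acc2 ++ [pvRowLine nameCell descCell attackCell mitCell]) acc
    =
    acc ++ (((pvCell 18 name :: List.replicate (max 1 (max attacks.length mitigations.length) - 1) (pvBlank 18)).zip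
      ((pvCell 52 desc :: List.replicate (max 1 (max attacks.length mitigations.length) - 1) (pvBlank 52)).zip
        ((attacks.map (pvCell 79) ++ List.replicate (max 1 (max attacks.length mitigations.length) - attacks.length) (pvBlank 79)).zip
          (mitigations.map (pvCell 33) ++ List.replicate (max 1 (max attacks.length mitigations.length) - mitigations.length) (pvBlank 33))))).map
      (fun p => pvRowLine p.1 p.2.1 p.2.2.1 p.2.2.2)) := by
  have h : (max 1 (max (attacks.length : Int) (mitigations.length : Int)))
      = ((max 1 (max attacks.length mitigations.length) : Nat) : Int) := by push_cast; omega
  rw [h, PySem.List.pyRange_zero_nat, List.foldl_map, PySem.List.foldl_append_singleton_eq_map]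
  set m := max 1 (max attacks.length mitigations.length) with hm
  have hla : attacks.length ≤ m := by omega
  have hlm : mitigations.length ≤ m := by omega
  congr 1
  apply List.ext_getElem
  · simp; omega
  · intro i h1 h2
    simp only [List.getElem_map, List.getElem_range, List.getElem_zip]
    rw [pv_col_head, pv_col_head, pv_col_pad 79 m i attacks hla, pv_col_pad 33 m i mitigations hlm]

-- ===== VERDICT (by name: the statement is the Claim_ definition above) =====
theorem format_property_table_py_spec : Claim_equal_format_property_table_py := by
  intro rows _
  unfold Spec_format_property_table_py format_property_table_py format_property_table_py_alt
  dsimp only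
  congr 1
  apply congrArg
  apply List.foldl_ext
  intro acc r _
  dsimp only
  rw [pv_block_eq_proof]
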